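-- pv_equiv track=rewrite | github.com/R0LDI/AyED1-2024-TPs | tp01/example.py | total_cajones
-- ===== SOURCE A (Python) =====
-- from typing import List
--
-- def total_cajones(l: List[int]) -> tuple[List[int], int, int]:
--     cajones = []
--     cantidad = 0
--     peso = 0
--     for naranja in l:
--         if naranja >= 200 and naranja <= 300:
--             peso += naranja
--             cantidad += 1
--         if cantidad == 100:
--             cajones.append(peso)
--             cantidad = 0
--             peso = 0
--     if cantidad:
--       cajones.append(peso)
--     sobrante = cantidad
--     return cajones, len(cajones), sobrante
-- ===== SOURCE B (Python) =====
-- from typing import List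
--
-- def total_cajones(l: List[int]) -> tuple[List[int], int, int]:
--     valids = [x for x in l if 200 <= x <= 300]
--     cajones = [sum(valids[i:i + 100]) for i in range(0, len(valids), 100)]
--     return cajones, len(cajones), len(valids) % 100
-- ===== Notes on version B (the rewrite author's own statement) =====
-- stated objective: simpler
-- what changed: Replaces the online running-accumulator loop (peso/cantidad with in-loop flushes and a post-loop partial append) by a two-phase filter-then-chunk: build the valid list once, then sum consecutive slices of 100.
import Mathlib
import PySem

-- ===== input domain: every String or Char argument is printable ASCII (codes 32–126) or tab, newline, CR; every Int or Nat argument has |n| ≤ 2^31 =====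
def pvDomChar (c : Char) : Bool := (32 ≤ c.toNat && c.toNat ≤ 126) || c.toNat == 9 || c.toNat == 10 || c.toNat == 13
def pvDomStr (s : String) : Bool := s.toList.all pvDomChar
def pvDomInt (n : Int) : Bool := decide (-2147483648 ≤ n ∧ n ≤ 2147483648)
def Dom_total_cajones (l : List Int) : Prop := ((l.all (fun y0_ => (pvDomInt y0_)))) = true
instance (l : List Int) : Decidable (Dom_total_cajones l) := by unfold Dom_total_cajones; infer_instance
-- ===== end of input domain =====

-- B rewrites A's online running-accumulator loop as a two-phase filter-then-chunk decomposition (same O(n) cost, plainer structure).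


-- ===== PORT A =====
-- one iteration of A's for-loop, on the state (cajones, cantidad, peso)
def pvStepA (st : List Int × Int × Int) (naranja : Int) : List Int × Int × Int :=
  let cajones := st.1
  let cantidad := st.2.1
  let peso := st.2.2
  let peso := if 200 ≤ naranja ∧ naranja ≤ 300 then peso + naranja else peso
  let cantidad := if 200 ≤ naranja ∧ naranja ≤ 300 then cantidad + 1 else cantidad
  if cantidad = 100 then (cajones ++ [peso], 0, 0) else (cajones, cantidad, peso)

def total_cajones (l : List Int) : List Int × Int × Int :=
  let s := l.foldl pvStepA ([], 0, 0)
  let cajones := s.1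
  let cantidad := s.2.1
  let peso := s.2.2
  let cajones := if cantidad ≠ 0 then cajones ++ [peso] else cajones
  (cajones, (cajones.length : Int), cantidad)

-- ===== PORT B =====
def total_cajones_alt (l : List Int) : List Int × Int × Int :=
  let valids := l.filter (fun x => decide (200 ≤ x) && decide (x ≤ 300))
  let cajones := (PySem.List.pyRange 0 (valids.length : Int) 100).map
      (fun i => (PySem.List.slice valids (some i) (some (i + 100))).sum)
  (cajones, (cajones.length : Int), PySem.Int.mod (valids.length : Int) 100)

-- ===== PRECONDITION & SPEC =====
def Spec_total_cajones (l : List Int) (out : List Int × Int × Int) : Prop := out = total_cajones_alt l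
instance (l : List Int) (out : List Int × Int × Int) : Decidable (Spec_total_cajones l out) := by unfold Spec_total_cajones; infer_instance

-- ===== CLAIM (what is proved, stated in full; the proofs are below) =====
def Claim_equal_total_cajones : Prop := ∀ (l : List Int), Dom_total_cajones l → Spec_total_cajones l (total_cajones l)

-- ===== LEMMAS AND PROOFS =====

-- all chunk sums of v, chunks of ≤ 100 (the common description of both cajones lists)
def pvChunkAll (v : List Int) : List Int :=
  if v = [] then [] else (v.take 100).sum :: pvChunkAll (v.drop 100)
termination_by v.length
decreasing_by
  rename_i h
  have := List.length_pos_iff.mpr h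
  simp [List.length_drop]
  omega

-- sums of the FULL chunks of 100 only (what A has accumulated when the loop ends)
def pvChunkFull (v : List Int) : List Int :=
  if v.length < 100 then [] else (v.take 100).sum :: pvChunkFull (v.drop 100)
termination_by v.length
decreasing_by
  simp [List.length_drop]
  omega

theorem pvStepA_invalid (st : List Int × Int × Int) (x : Int)
    (hx : ¬ (200 ≤ x ∧ x ≤ 300)) (h : st.2.1 ≠ 100) : pvStepA st x = st := by
  simp [pvStepA, hx, h]

theorem pvStepA_valid (c : List Int) (cant peso x : Int)
    (hx : 200 ≤ x ∧ x ≤ 300) :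
    pvStepA (c, cant, peso) x =
      if cant + 1 = 100 then (c ++ [peso + x], 0, 0) else (c, cant + 1, peso + x) := by
  simp [pvStepA, hx]

-- A's loop skips invalid oranges entirely (the cantidad = 100 check can never fire there)
theorem foldA_filter (l : List Int) (c : List Int) (cant peso : Int)
    (h1 : cant < 100) :
    l.foldl pvStepA (c, cant, peso) =
      (l.filter (fun x => decide (200 ≤ x) && decide (x ≤ 300))).foldl pvStepA (c, cant, peso) := by
  induction l generalizing c cant peso with
  | nil => rfl
  | cons x rest ih =>
    by_cases hx : 200 ≤ x ∧ x ≤ 300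
    · have hf : (fun x => decide (200 ≤ x) && decide (x ≤ 300)) x = true := by
        simp [hx.1, hx.2]
      simp only [List.filter_cons, hf, if_true, List.foldl_cons]
      rw [pvStepA_valid c cant peso x hx]
      split
      · exact ih _ _ _ (by omega)
      · next h100 => exact ih _ _ _ (by omega)
  -- invalid: step is the identity since cant ≠ 100
    · have hf : (fun x => decide (200 ≤ x) && decide (x ≤ 300)) x = false := by
        rcases not_and_or.mp hx with h | h <;> simp [h]
      simp only [List.filter_cons, hf, Bool.false_eq_true, if_false, List.foldl_cons]
      rw [pvStepA_invalid (c, cant, peso) x hx (by simp; omega)]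
      exact ih _ _ _ h1

-- folding a run of valid oranges that never fills a box
theorem foldA_inner (v : List Int) (hv : ∀ x ∈ v, 200 ≤ x ∧ x ≤ 300)
    (c : List Int) (cant peso : Int) (hlen : cant + v.length < 100) :
    v.foldl pvStepA (c, cant, peso) = (c, cant + v.length, peso + v.sum) := by
  induction v generalizing cant peso with
  | nil => simp
  | cons x rest ih =>
    simp only [List.foldl_cons]
    rw [pvStepA_valid c cant peso x (hv x (by simp))]
    have : ¬ (cant + 1 = 100) := by simp at hlen ⊢; omega
    rw [if_neg this]
    rw [ih (fun y hy => hv y (by simp [hy])) (cant + 1) (peso + x) (by simp at hlen ⊢; omega)]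
    simp
    omega

-- folding a run of valid oranges that exactly fills the current box
theorem foldA_exact (v : List Int) (hv : ∀ x ∈ v, 200 ≤ x ∧ x ≤ 300)
    (c : List Int) (cant peso : Int) (h1 : cant < 100) (hlen : cant + v.length = 100) :
    v.foldl pvStepA (c, cant, peso) = (c ++ [peso + v.sum], 0, 0) := by
  induction v generalizing c cant peso with
  | nil => simp at hlen; omega
  | cons x rest ih =>
    simp only [List.foldl_cons]
    rw [pvStepA_valid c cant peso x (hv x (by simp))]
    by_cases h100 : cant + 1 = 100
    · have hrest : rest = [] := by
        simp at hlen
        have : rest.length = 0 := by omega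
        exact List.eq_nil_of_length_eq_zero this
      subst hrest
      simp [h100]
    · rw [if_neg h100]
      rw [ih (fun y hy => hv y (by simp [hy])) c (cant + 1) (peso + x) (by omega)
          (by simp at hlen ⊢; omega)]
      simp
      ring

-- the main loop invariant on a fully valid list, in chunk form
theorem foldA_main (v : List Int) (hv : ∀ x ∈ v, 200 ≤ x ∧ x ≤ 300) (c : List Int) :
    v.foldl pvStepA (c, 0, 0) =
      (c ++ pvChunkFull v, ((v.length % 100 : Nat) : Int),
        (v.drop (100 * (v.length / 100))).sum) := by
  by_cases hsmall : v.length < 100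
  · rw [foldA_inner v hv c 0 0 (by omega)]
    rw [pvChunkFull.eq_def, if_pos hsmall]
    have h1 : v.length % 100 = v.length := Nat.mod_eq_of_lt hsmall
    have h2 : v.length / 100 = 0 := Nat.div_eq_of_lt hsmall
    simp [h1, h2]
  · rw [not_lt] at hsmall
    have hsplit := List.take_append_drop 100 v
    conv_lhs => rw [← hsplit]
    rw [List.foldl_append]
    rw [foldA_exact (v.take 100) (fun x hx => hv x (List.mem_of_mem_take hx)) c 0 0
        (by omega) (by simp [List.length_take]; omega)]
    simp only [zero_add]
    rw [pvChunkFull.eq_def, if_neg (by omega)]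
    rw [foldA_main (v.drop 100) (fun x hx => hv x (List.mem_of_mem_drop hx)) (c ++ [(v.take 100).sum])]
    have hlen : v.length = 100 + (v.drop 100).length := by simp [List.length_drop]; omega
    simp only [Prod.mk.injEq]
    refine ⟨by simp, ?_, ?_⟩
    · rw [hlen, Nat.add_mod_left]
    · rw [List.drop_drop, hlen]
      congr 2
      omega
termination_by v.length
decreasing_by simp [List.length_drop]; omega

-- chunkAll = full chunks plus (when nonempty) the final partial chunk
theorem pvChunkAll_eq (v : List Int) :
    pvChunkAll v = pvChunkFull v ++
      (if v.length % 100 ≠ 0 then [(v.drop (100 * (v.length / 100))).sum] else []) := by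
  by_cases hnil : v = []
  · subst hnil; rw [pvChunkAll.eq_def, pvChunkFull.eq_def]; simp
  · by_cases hsmall : v.length < 100
    · have hpos : 0 < v.length := List.length_pos_iff.mpr hnil
      rw [pvChunkAll.eq_def, if_neg hnil, pvChunkFull.eq_def, if_pos hsmall]
      have hd : v.drop 100 = [] := List.drop_eq_nil_of_le (by omega)
      rw [hd, pvChunkAll.eq_def]
      have h1 : v.length % 100 = v.length := Nat.mod_eq_of_lt hsmall
      have h2 : v.length / 100 = 0 := Nat.div_eq_of_lt hsmall
      simp [h1, h2, List.take_of_length_le (le_of_lt hsmall), hpos.ne']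
    · rw [not_lt] at hsmall
      rw [pvChunkAll.eq_def, if_neg hnil, pvChunkFull.eq_def, if_neg (by omega)]
      rw [pvChunkAll_eq (v.drop 100)]
      have hlen : v.length = 100 + (v.drop 100).length := by simp [List.length_drop]; omega
      rw [hlen]
      have hdiv : (100 + (v.drop 100).length) / 100 = 1 + (v.drop 100).length / 100 := by omega
      rw [Nat.add_mod_left, hdiv, Nat.mul_add, Nat.mul_one, ← List.drop_drop]
      simp
termination_by v.length
decreasing_by simp [List.length_drop]; omega

-- pyRange 0 n 100 peels like a chunk: first index 0, the rest shifted by 100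
theorem pyRange_chunk_cons (n : Int) (h : 0 < n) :
    PySem.List.pyRange 0 n 100 =
      0 :: (PySem.List.pyRange 0 (n - 100) 100).map (· + 100) := by
  rw [PySem.List.pyRange_of_pos 0 n (by norm_num),
      PySem.List.pyRange_of_pos 0 (n - 100) (by norm_num)]
  have hcnt : (if (0:Int) < n then ((n - 0 + 100 - 1) / 100).toNat else 0) =
      (if (0:Int) < n - 100 then ((n - 100 - 0 + 100 - 1) / 100).toNat else 0) + 1 := by
    rw [if_pos h]
    by_cases h2 : (0:Int) < n - 100
    · rw [if_pos h2]; omega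
    · rw [if_neg h2]; omega
  rw [hcnt, List.range_succ_eq_map]
  simp [List.map_map, Function.comp_def]
  intro a _
  ring

theorem pyRange_chunk_nil (n : Int) (h : n ≤ 0) : PySem.List.pyRange 0 n 100 = [] := by
  rw [PySem.List.pyRange_of_pos 0 n (by norm_num), if_neg (by omega)]
  simp

-- B's slice-sum comprehension computes pvChunkAll
theorem chunkB_eq (v : List Int) :
    (PySem.List.pyRange 0 (v.length : Int) 100).map
        (fun i => (PySem.List.slice v (some i) (some (i + 100))).sum) = pvChunkAll v := by
  by_cases hnil : v = []
  · subst hnil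
    simp only [List.length_nil, Nat.cast_zero]
    rw [pyRange_chunk_nil 0 le_rfl, pvChunkAll.eq_def]
    simp
  · have hpos : 0 < v.length := List.length_pos_iff.mpr hnil
    rw [pyRange_chunk_cons (v.length : Int) (by exact_mod_cast hpos)]
    rw [pvChunkAll.eq_def, if_neg hnil]
    simp only [List.map_cons, List.map_map]
    congr 1
    · -- head: v[0:100] = take 100 v
      have h := PySem.List.slice_natCast_add v 0 100
      push_cast at h
      norm_num at h ⊢
      rw [h]
    · -- tail: shift by 100 = chunks of v.drop 100
      rw [← chunkB_eq (v.drop 100)]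
      have hrange : PySem.List.pyRange 0 ((v.length : Int) - 100) 100 =
          PySem.List.pyRange 0 (((v.drop 100).length : Nat) : Int) 100 := by
        by_cases hle : v.length ≤ 100
        · have h0 : (v.drop 100).length = 0 := by simp [List.length_drop]; omega
          rw [pyRange_chunk_nil _ (by omega : (v.length : Int) - 100 ≤ 0),
              pyRange_chunk_nil _ (by rw [h0]; norm_num)]
        · congr 1
          simp [List.length_drop]
          omega
      rw [← hrange]
      apply List.map_congr_left
      intro i hi
      have hmem := (PySem.List.mem_pyRange_iff_of_pos (by norm_num : (0:Int) < 100) i).mp hi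
      have hi0 : 0 ≤ i := hmem.1
      obtain ⟨j, rfl⟩ := Int.eq_ofNat_of_zero_le hi0
      simp only [Function.comp_apply]
      have h1 : PySem.List.slice v (some ((j : Int) + 100)) (some ((j : Int) + 100 + 100)) =
          (v.drop (j + 100)).take 100 := by
        have := PySem.List.slice_natCast_add v (j + 100) 100
        push_cast at this ⊢
        rw [show (j : Int) + 100 + 100 = ((j:Int) + 100) + 100 by ring]
        exact_mod_cast this
      have h2 : PySem.List.slice (v.drop 100) (some (j : Int)) (some ((j : Int) + 100)) =
          ((v.drop 100).drop j).take 100 := by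
        have := PySem.List.slice_natCast_add (v.drop 100) j 100
        push_cast at this ⊢
        exact_mod_cast this
      rw [h1, h2, List.drop_drop]
      ring_nf
termination_by v.length
decreasing_by simp [List.length_drop]; omega

theorem fmod_cast (n : Nat) : PySem.Int.mod (n : Int) 100 = ((n % 100 : Nat) : Int) := by
  unfold PySem.Int.mod
  rw [Int.fmod_eq_emod, if_pos (Or.inl (by norm_num))]
  omega

-- ===== VERDICT (by name: the statement is the Claim_ definition above) =====
theorem total_cajones_spec : Claim_equal_total_cajones := by
  intro l _
  unfold Spec_total_cajones
  simp only [total_cajones, total_cajones_alt]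
  set v := l.filter (fun x => decide (200 ≤ x) && decide (x ≤ 300)) with hv
  have hvv : ∀ x ∈ v, 200 ≤ x ∧ x ≤ 300 := by
    intro x hx
    rw [hv] at hx
    have := (List.mem_filter.mp hx).2
    simpa using this
  rw [foldA_filter l [] 0 0 (by norm_num), ← hv, foldA_main v hvv [], chunkB_eq v,
      fmod_cast, pvChunkAll_eq v]
  simp only [List.nil_append]
  by_cases hz : v.length % 100 = 0
  · simp [hz]
  · have h : (((v.length % 100 : Nat) : Int)) ≠ 0 := by exact_mod_cast hz
    have hd : ¬ ((100:Int) ∣ (v.length : Int)) := by omega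
    simp [hz, hd]
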